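-- pv_equiv track=rewrite | github.com/darraes/coding_questions | 2018/path_finding/task_allocation.py | allocate_task_impl
-- ===== SOURCE A (Python) =====
-- def allocate_task_impl(task_id, allocations, tasks, capacities):
--     if task_id == len(tasks):
--         return True
--
--     for idx, server_capacity in enumerate(capacities):
--         if tasks[task_id] <= server_capacity:
--             capacities[idx] -= tasks[task_id]
--             allocations[task_id] = idx
--
--             if allocate_task_impl(task_id + 1,
--                                   allocations,
--                                   tasks,
--                                   capacities):
--                 return True
--
--             capacities[idx] += tasks[task_id]
--             del allocations[task_id]
--
--     return False
-- ===== SOURCE B (Python) =====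
-- def allocate_task_impl(task_id, allocations, tasks, capacities):
--     # Iterative backtracking with an explicit stack of (task_id, next_server_index)
--     # frames instead of recursion.  Same in-place mutations as the recursive version:
--     # on success capacities/allocations keep the found assignment, on failure every
--     # tentative assignment is undone while the stack unwinds.
--     n = len(tasks)
--     stack = [(task_id, 0)]
--     while stack:
--         tid, idx = stack[-1]
--         if tid == n:
--             return True
--         placed = False
--         while idx < len(capacities):
--             if tasks[tid] <= capacities[idx]:
--                 capacities[idx] -= tasks[tid]
--                 allocations[tid] = idx
--                 stack[-1] = (tid, idx + 1)
--                 stack.append((tid + 1, 0))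
--                 placed = True
--                 break
--             idx += 1
--         if not placed:
--             stack.pop()
--             if stack:
--                 ptid, pidx = stack[-1]
--                 capacities[pidx - 1] += tasks[ptid]
--                 del allocations[ptid]
--     return False
-- ===== Notes on version B (the rewrite author's own statement) =====
-- stated objective: alternative
-- what changed: A's recursive backtracking DFS is replaced by an iterative machine with an explicit stack of (task_id, next_server_index) frames that pushes on the first fitting server and pops/undoes on exhaustion, preserving the left-to-right search order and all in-place mutations.
import Mathlib
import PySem

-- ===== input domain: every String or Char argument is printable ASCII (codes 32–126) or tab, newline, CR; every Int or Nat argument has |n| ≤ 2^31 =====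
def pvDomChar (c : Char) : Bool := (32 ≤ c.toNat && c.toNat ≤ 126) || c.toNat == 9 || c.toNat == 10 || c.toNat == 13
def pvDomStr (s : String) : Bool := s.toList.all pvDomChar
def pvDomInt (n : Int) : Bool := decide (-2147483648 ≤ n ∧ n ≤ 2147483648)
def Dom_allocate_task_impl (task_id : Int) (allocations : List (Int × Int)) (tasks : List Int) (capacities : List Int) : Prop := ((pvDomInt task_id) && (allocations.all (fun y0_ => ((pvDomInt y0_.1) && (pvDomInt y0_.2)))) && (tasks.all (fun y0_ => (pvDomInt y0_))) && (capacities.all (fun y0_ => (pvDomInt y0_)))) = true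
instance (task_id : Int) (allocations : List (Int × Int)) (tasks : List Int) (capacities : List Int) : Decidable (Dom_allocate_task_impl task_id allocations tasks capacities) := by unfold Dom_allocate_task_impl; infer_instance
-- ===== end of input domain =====

-- B replaces A's recursive backtracking DFS by an explicit stack machine of (task_id, next_server_index)
-- frames (objective: alternative decomposition, same search order and cost). The equivalence proved here is
-- about the RETURN value; both implementations also perform the same in-place mutations in Python.

lemma pvGet_some_lt {tasks : List Int} {tid : Int} {t : Int}
    (h : PySem.List.pyGet? tasks tid = some t) : tid < (tasks.length : Int) := by
  by_contra hc
  have : PySem.List.pyGet? tasks tid = none := by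
    rw [PySem.List.pyGet?_eq_none_iff]; intro ⟨_, h2⟩; omega
  simp [this] at h

-- small named facts cited by the termination proofs of the ports
lemma pvDecTask {tasks : List Int} {tid : Int} {t : Int}
    (h : PySem.List.pyGet? tasks tid = some t) :
    (tasks.length - (tid + 1)).toNat < (tasks.length - tid).toNat := by
  have := pvGet_some_lt h; omega

lemma pvDecIdx {m idx : Nat} (h : idx < m) : m - (idx + 1) < m - idx := by omega

lemma pvDecIdx2 {caps2 : List Int} {m idx : Nat} (hlen : caps2.length = m) (h : idx < m) :
    caps2.length - (idx + 1) < m - idx := by omega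

lemma pvLenSet2 (caps : List Int) (i j : Int) (v w : Int) :
    (PySem.List.pySetD (PySem.List.pySetD caps i v) j w).length = caps.length := by
  simp [PySem.List.length_pySetD]

lemma pvDecScan {m : Nat} {idx : Int} (h : idx < (m : Int)) :
    ((m : Int) - (idx + 1)).toNat < ((m : Int) - idx).toNat := by omega


-- ===== PORT A =====

mutual
def allocate_task_impl (task_id : Int) (allocations : List (Int × Int)) (tasks : List Int) (capacities : List Int) : Bool :=
  if task_id = (tasks.length : Int) then true
  else pvLoopA task_id (PySem.Dict.mk allocations) tasks capacities 0
termination_by ((tasks.length - task_id).toNat, capacities.length + 1)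
decreasing_by exact Prod.Lex.right _ (Nat.lt_succ_self _)

-- the 'for idx, server_capacity in enumerate(capacities)' loop of A, resumed at index idx
def pvLoopA (task_id : Int) (alloc : PySem.Dict Int Int) (tasks : List Int) (caps : List Int) (idx : Nat) : Bool :=
  if _h : idx < caps.length then
    match hget : PySem.List.pyGet? tasks task_id with
    | none => false   -- Python raises IndexError at tasks[task_id]; excluded by Pre_
    | some t =>
      if t ≤ PySem.List.pyGetD caps (idx : Int) 0 then
        let caps' := PySem.List.pySetD caps (idx : Int) (PySem.List.pyGetD caps (idx : Int) 0 - t)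
        let alloc' := alloc.insert task_id (idx : Int)
        if allocate_task_impl (task_id + 1) alloc'.items tasks caps' then true
        else
          -- capacities[idx] += tasks[task_id]; del allocations[task_id]
          pvLoopA task_id (alloc'.erase task_id) tasks
            (PySem.List.pySetD caps' (idx : Int) (PySem.List.pyGetD caps' (idx : Int) 0 + t)) (idx + 1)
      else pvLoopA task_id alloc tasks caps (idx + 1)
  else false
termination_by ((tasks.length - task_id).toNat, caps.length - idx)
decreasing_by
  · exact Prod.Lex.left _ _ (pvDecTask hget)
  · exact Prod.Lex.right _ (pvDecIdx2 (pvLenSet2 ..) _h)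
  · exact Prod.Lex.right _ (pvDecIdx _h)
end

-- ===== PORT B =====
-- B's inner 'while idx < len(capacities)' scan: first index j ≥ idx whose server fits, with tasks[tid]
def pvScanB (tasks : List Int) (tid : Int) (caps : List Int) (idx : Int) : Option (Int × Int) :=
  if _h : idx < (caps.length : Int) then
    match PySem.List.pyGet? tasks tid with
    | none => none   -- Python raises IndexError at tasks[tid]; excluded by Pre_
    | some t =>
      if t ≤ PySem.List.pyGetD caps idx 0 then some (idx, t)
      else pvScanB tasks tid caps (idx + 1)
  else none
termination_by ((caps.length : Int) - idx).toNat
decreasing_by exact pvDecScan _h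

-- termination measure of the stack machine (proof-irrelevant potential over the frames)
def pvMu (m L : Nat) : List (Int × Int) → Nat
  | [] => 0
  | (tid, idx) :: st => ((m : Int) + 1 - idx).toNat * (m + 3) ^ (((L : Int) - tid).toNat) + 1 + pvMu m L st


-- the outer 'while stack' loop of B; the Nat argument is a fuel bound making the
-- recursion structural (pvStepB_eq below shows the initial fuel pvMu + 1 is never exhausted)
def pvStepB (tasks : List Int) : Nat → List (Int × Int) → PySem.Dict Int Int → List Int → Bool
  | 0, _, _, _ => false
  | _ + 1, [], _, _ => false
  | fuel + 1, (tid, idx) :: st, alloc, caps =>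
    if tid = (tasks.length : Int) then true
    else
      match pvScanB tasks tid caps idx with
      | some (j, t) =>
        -- found a fitting server: take it, remember to resume this frame at j+1, descend
        pvStepB tasks fuel ((tid + 1, 0) :: (tid, j + 1) :: st) (alloc.insert tid j)
          (PySem.List.pySetD caps j (PySem.List.pyGetD caps j 0 - t))
      | none =>
        -- scan exhausted: pop, and undo the parent's tentative assignment
        match st with
        | [] => false
        | (ptid, pidx) :: st' =>
          match PySem.List.pyGet? tasks ptid with
          | none => false   -- Python raises IndexError at tasks[ptid]; excluded by Pre_
          | some pt =>
            pvStepB tasks fuel ((ptid, pidx) :: st') (alloc.erase ptid)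
              (PySem.List.pySetD caps (pidx - 1) (PySem.List.pyGetD caps (pidx - 1) 0 + pt))

def allocate_task_impl_alt (task_id : Int) (allocations : List (Int × Int)) (tasks : List Int) (capacities : List Int) : Bool :=
  pvStepB tasks (pvMu capacities.length tasks.length [(task_id, 0)] + 1) [(task_id, 0)]
    (PySem.Dict.mk allocations) capacities

-- ===== PRECONDITION & SPEC =====
-- Pre_ excludes exactly the inputs on which the Python A raises IndexError at tasks[task_id]:
-- task_id outside [-len(tasks), len(tasks)] while capacities is non-empty.
def Pre_allocate_task_impl (task_id : Int) (allocations : List (Int × Int)) (tasks : List Int) (capacities : List Int) : Prop :=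
  (-(tasks.length : Int) ≤ task_id ∧ task_id ≤ (tasks.length : Int)) ∨ capacities = []
instance (task_id : Int) (allocations : List (Int × Int)) (tasks : List Int) (capacities : List Int) : Decidable (Pre_allocate_task_impl task_id allocations tasks capacities) := by unfold Pre_allocate_task_impl; infer_instance

def pvWitness_allocate_task_impl : Int × (List (Int × Int)) × List Int × List Int := (0, [], [1, 2], [2, 3])

def Spec_allocate_task_impl (task_id : Int) (allocations : List (Int × Int)) (tasks : List Int) (capacities : List Int) (out : Bool) : Prop := out = allocate_task_impl_alt task_id allocations tasks capacities
instance (task_id : Int) (allocations : List (Int × Int)) (tasks : List Int) (capacities : List Int) (out : Bool) : Decidable (Spec_allocate_task_impl task_id allocations tasks capacities out) := by unfold Spec_allocate_task_impl; infer_instance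

-- ===== CLAIM (what is proved, stated in full; the proofs are below) =====
def Claim_equal_allocate_task_impl : Prop := ∀ (task_id : Int) (allocations : List (Int × Int)) (tasks : List Int) (capacities : List Int), Dom_allocate_task_impl task_id allocations tasks capacities → Pre_allocate_task_impl task_id allocations tasks capacities → Spec_allocate_task_impl task_id allocations tasks capacities (allocate_task_impl task_id allocations tasks capacities)

-- ===== LEMMAS AND PROOFS =====

lemma pvDecZeroInt (m : Nat) : ((m : Int) - 0).toNat < m + 1 := by omega

lemma pvScanB_some (tasks : List Int) (tid : Int) (caps : List Int) :
    ∀ idx j t, pvScanB tasks tid caps idx = some (j, t) →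
      idx ≤ j ∧ j < (caps.length : Int) ∧ PySem.List.pyGet? tasks tid = some t ∧
        t ≤ PySem.List.pyGetD caps j 0 := by
  suffices H : ∀ (k : Nat) (idx j t : Int), ((caps.length : Int) - idx).toNat = k →
      pvScanB tasks tid caps idx = some (j, t) →
      idx ≤ j ∧ j < (caps.length : Int) ∧ PySem.List.pyGet? tasks tid = some t ∧
        t ≤ PySem.List.pyGetD caps j 0 by
    exact fun idx j t h => H _ idx j t rfl h
  intro k
  induction k using Nat.strong_induction_on with
  | _ k IH =>
    intro idx j t hk h
    rw [pvScanB.eq_def] at h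
    split at h
    · rename_i hlt
      cases hget : PySem.List.pyGet? tasks tid with
      | none => rw [hget] at h; simp at h
      | some t' =>
        rw [hget] at h
        simp only at h
        split at h
        · rename_i hle
          simp only [Option.some.injEq, Prod.mk.injEq] at h
          obtain ⟨rfl, rfl⟩ := h
          exact ⟨le_refl _, hlt, rfl, hle⟩
        · have := IH (((caps.length : Int) - (idx + 1)).toNat) (by omega) (idx + 1) j t rfl h
          refine ⟨by omega, this.2.1, ?_, this.2.2.2⟩
          rw [← hget]; exact this.2.2.1
    · simp at h

lemma pvMu_push (m L : Nat) (tid idx j : Int) (st : List (Int × Int))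
    (h1 : idx ≤ j) (h2 : j < (m : Int)) (h3 : tid < (L : Int)) :
    pvMu m L ((tid + 1, 0) :: (tid, j + 1) :: st) < pvMu m L ((tid, idx) :: st) := by
  simp only [pvMu]
  have hW : (m + 3) ^ (((L : Int) - tid).toNat) = (m + 3) * (m + 3) ^ (((L : Int) - (tid + 1)).toNat) := by
    rw [show ((L : Int) - tid).toNat = ((L : Int) - (tid + 1)).toNat + 1 by omega, pow_succ]
    ring
  set W := (m + 3) ^ (((L : Int) - (tid + 1)).toNat) with hWdef
  have hW1 : 1 ≤ W := Nat.one_le_pow _ _ (by omega)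
  rw [hW]
  have ha : ((m : Int) + 1 - (j + 1)).toNat + 1 ≤ ((m : Int) + 1 - idx).toNat := by omega
  have hb : ((m : Int) + 1 - 0).toNat = m + 1 := by omega
  rw [hb]
  calc (m + 1) * W + 1 + (((m : Int) + 1 - (j + 1)).toNat * ((m + 3) * W) + 1 + pvMu m L st)
      < (((m : Int) + 1 - (j + 1)).toNat + 1) * ((m + 3) * W) + 1 + pvMu m L st := by
        have : (m + 1) * W + 1 + 1 ≤ (m + 3) * W := by nlinarith
        nlinarith [Nat.zero_le (pvMu m L st)]
    _ ≤ ((m : Int) + 1 - idx).toNat * ((m + 3) * W) + 1 + pvMu m L st := by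
        have := Nat.mul_le_mul_right ((m + 3) * W) ha
        omega

-- Pure (allocation-dictionary-free) reference for A's recursion, Int-indexed to match the machine.
mutual
def pvPureA (tasks : List Int) (tid : Int) (caps : List Int) : Bool :=
  if tid = (tasks.length : Int) then true else pvPureLoop tasks tid caps 0
termination_by ((tasks.length - tid).toNat, caps.length + 1)
decreasing_by exact Prod.Lex.right _ (pvDecZeroInt caps.length)

def pvPureLoop (tasks : List Int) (tid : Int) (caps : List Int) (idx : Int) : Bool :=
  if _h : idx < (caps.length : Int) then
    match hget : PySem.List.pyGet? tasks tid with
    | none => false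
    | some t =>
      if t ≤ PySem.List.pyGetD caps idx 0 then
        if pvPureA tasks (tid + 1) (PySem.List.pySetD caps idx (PySem.List.pyGetD caps idx 0 - t)) then true
        else pvPureLoop tasks tid caps (idx + 1)
      else pvPureLoop tasks tid caps (idx + 1)
  else false
termination_by ((tasks.length - tid).toNat, ((caps.length : Int) - idx).toNat)
decreasing_by
  · exact Prod.Lex.left _ _ (pvDecTask hget)
  · exact Prod.Lex.right _ (pvDecScan _h)
  · exact Prod.Lex.right _ (pvDecScan _h)
end


-- one frame of the machine, at the A level
def pvFrame (tasks : List Int) (tid idx : Int) (caps : List Int) : Bool :=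
  if tid = (tasks.length : Int) then true else pvPureLoop tasks tid caps idx

-- what the machine computes after popping the top frame, at the A level
def pvResume (tasks : List Int) : List (Int × Int) → List Int → Bool
  | [], _ => false
  | (ptid, pidx) :: st', caps =>
    match PySem.List.pyGet? tasks ptid with
    | none => false
    | some pt =>
      let caps2 := PySem.List.pySetD caps (pidx - 1) (PySem.List.pyGetD caps (pidx - 1) 0 + pt)
      if pvFrame tasks ptid pidx caps2 then true else pvResume tasks st' caps2

lemma pvMu_pop (m L : Nat) (tid idx : Int) (st : List (Int × Int)) :
    pvMu m L st < pvMu m L ((tid, idx) :: st) := by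
  simp only [pvMu]; omega

-- undoing a tentative assignment restores the capacities
lemma pvRestore_eq (caps : List Int) (j : Int) (h0 : 0 ≤ j) (h1 : j < (caps.length : Int)) (t : Int) :
    PySem.List.pySetD (PySem.List.pySetD caps j (PySem.List.pyGetD caps j 0 - t)) j
      (PySem.List.pyGetD (PySem.List.pySetD caps j (PySem.List.pyGetD caps j 0 - t)) j 0 + t) = caps := by
  obtain ⟨n, rfl⟩ : ∃ n : Nat, j = (n : Int) := ⟨j.toNat, (Int.toNat_of_nonneg h0).symm⟩
  have hn : n < caps.length := by exact_mod_cast h1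
  rw [PySem.List.pyGetD_pySetD_natCast _ _ _ _ _ hn, if_pos rfl,
    PySem.List.pySetD_natCast, PySem.List.pySetD_natCast, List.set_set,
    PySem.List.pyGetD_eq_getElem caps 0 (by omega) (by exact_mod_cast hn)]
  simp only [Int.toNat_natCast, sub_add_cancel]
  exact List.set_getElem_self hn

-- port A equals the pure reference (the allocations dictionary never influences the result)
lemma pvA_eq_pure (tasks : List Int) : ∀ k : Nat,
    (∀ (tid : Int) (al : List (Int × Int)) (caps : List Int),
      (tasks.length - tid).toNat * (caps.length + 2) + caps.length + 1 ≤ k →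
      allocate_task_impl tid al tasks caps = pvPureA tasks tid caps)
    ∧ (∀ (tid : Int) (alloc : PySem.Dict Int Int) (caps : List Int) (idx : Nat),
      (tasks.length - tid).toNat * (caps.length + 2) + (caps.length - idx) ≤ k →
      pvLoopA tid alloc tasks caps idx = pvPureLoop tasks tid caps (idx : Int)) := by
  intro k
  induction k using Nat.strong_induction_on with
  | _ k IH =>
    constructor
    · intro tid al caps hm
      rw [allocate_task_impl.eq_def, pvPureA.eq_def]
      split
      · rfl
      · have hcall := (IH ((tasks.length - tid).toNat * (caps.length + 2) + caps.length)
          (by omega)).2 tid (PySem.Dict.mk al) caps 0 (by omega)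
        simpa using hcall
    · intro tid alloc caps idx hm
      rw [pvLoopA.eq_def, pvPureLoop.eq_def]
      by_cases hlt : idx < caps.length
      · rw [dif_pos hlt, dif_pos (by exact_mod_cast hlt)]
        cases hget : PySem.List.pyGet? tasks tid with
        | none => simp
        | some t =>
          simp only
          have htid : tid < (tasks.length : Int) := pvGet_some_lt hget
          split
          · rename_i hfit
            have hA := (IH ((tasks.length - (tid + 1)).toNat * (caps.length + 2) + caps.length + 1)
              (by
                have hmul : (tasks.length - tid).toNat * (caps.length + 2) =
                    (tasks.length - (tid + 1)).toNat * (caps.length + 2) + (caps.length + 2) := by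
                  rw [show (tasks.length - tid).toNat = (tasks.length - (tid + 1)).toNat + 1 by omega,
                    Nat.succ_mul]
                omega)).1 (tid + 1)
              (PySem.Dict.insert alloc tid (idx : Int)).items
              (PySem.List.pySetD caps (idx : Int) (PySem.List.pyGetD caps (idx : Int) 0 - t))
              (by simp only [PySem.List.length_pySetD]; omega)
            rw [hA]
            split
            · rfl
            · have hL := (IH ((tasks.length - tid).toNat * (caps.length + 2) + (caps.length - (idx + 1)))
                (by omega)).2 tid ((PySem.Dict.insert alloc tid (idx : Int)).erase tid)
                (PySem.List.pySetD
                  (PySem.List.pySetD caps (idx : Int) (PySem.List.pyGetD caps (idx : Int) 0 - t)) (idx : Int)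
                  (PySem.List.pyGetD
                    (PySem.List.pySetD caps (idx : Int) (PySem.List.pyGetD caps (idx : Int) 0 - t)) (idx : Int) 0 + t))
                (idx + 1) (by simp only [PySem.List.length_pySetD]; omega)
              rw [hL, pvRestore_eq caps (idx : Int) (by omega) (by exact_mod_cast hlt) t]
              norm_num
          · have hL := (IH ((tasks.length - tid).toNat * (caps.length + 2) + (caps.length - (idx + 1)))
              (by omega)).2 tid alloc caps (idx + 1) (by omega)
            rw [hL]
            norm_num
      · rw [dif_neg hlt, dif_neg (by exact_mod_cast hlt)]

-- a failed scan means the pure loop fails from that index on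
lemma pvScanB_none (tasks : List Int) (tid : Int) (caps : List Int) :
    ∀ idx, pvScanB tasks tid caps idx = none → pvPureLoop tasks tid caps idx = false := by
  suffices H : ∀ (k : Nat) (idx : Int), ((caps.length : Int) - idx).toNat = k →
      pvScanB tasks tid caps idx = none → pvPureLoop tasks tid caps idx = false by
    exact fun idx h => H _ idx rfl h
  intro k
  induction k using Nat.strong_induction_on with
  | _ k IH =>
    intro idx hk h
    rw [pvScanB.eq_def] at h
    rw [pvPureLoop.eq_def]
    split at h
    · rename_i hlt
      rw [dif_pos hlt]
      cases hget : PySem.List.pyGet? tasks tid with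
      | none => simp
      | some t =>
        rw [hget] at h
        simp only at h ⊢
        split at h
        · simp at h
        · rename_i hnfit
          rw [if_neg hnfit]
          exact IH (((caps.length : Int) - (idx + 1)).toNat) (by omega) (idx + 1) rfl h
    · rename_i hge
      rw [dif_neg hge]

-- a successful scan lets the pure loop jump to the found index
lemma pvScanB_some_pure (tasks : List Int) (tid : Int) (caps : List Int) :
    ∀ idx j t, pvScanB tasks tid caps idx = some (j, t) →
      pvPureLoop tasks tid caps idx =
        (if pvPureA tasks (tid + 1) (PySem.List.pySetD caps j (PySem.List.pyGetD caps j 0 - t)) then true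
         else pvPureLoop tasks tid caps (j + 1)) := by
  suffices H : ∀ (k : Nat) (idx j t : Int), ((caps.length : Int) - idx).toNat = k →
      pvScanB tasks tid caps idx = some (j, t) →
      pvPureLoop tasks tid caps idx =
        (if pvPureA tasks (tid + 1) (PySem.List.pySetD caps j (PySem.List.pyGetD caps j 0 - t)) then true
         else pvPureLoop tasks tid caps (j + 1)) by
    exact fun idx j t h => H _ idx j t rfl h
  intro k
  induction k using Nat.strong_induction_on with
  | _ k IH =>
    intro idx j t hk h
    rw [pvScanB.eq_def] at h
    split at h
    · rename_i hlt
      rw [pvPureLoop.eq_def, dif_pos hlt]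
      cases hget : PySem.List.pyGet? tasks tid with
      | none => rw [hget] at h; simp at h
      | some t' =>
        rw [hget] at h
        simp only at h ⊢
        split at h
        · rename_i hfit
          simp only [Option.some.injEq, Prod.mk.injEq] at h
          obtain ⟨rfl, rfl⟩ := h
          rw [if_pos hfit]
        · rename_i hnfit
          rw [if_neg hnfit]
          exact IH (((caps.length : Int) - (idx + 1)).toNat) (by omega) (idx + 1) j t rfl h
    · simp at h

-- the machine computes: current frame, else resume the rest of the stack
lemma pvStepB_eq (tasks : List Int) : ∀ (n : Nat) (tid idx : Int) (st : List (Int × Int))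
    (alloc : PySem.Dict Int Int) (caps : List Int),
    pvMu caps.length tasks.length ((tid, idx) :: st) < n → 0 ≤ idx → (∀ p ∈ st, 0 ≤ p.2) →
    pvStepB tasks n ((tid, idx) :: st) alloc caps =
      (if pvFrame tasks tid idx caps then true else pvResume tasks st caps) := by
  intro n
  induction n using Nat.strong_induction_on with
  | _ n IH =>
    intro tid idx st alloc caps hmu h0 hst
    cases n with
    | zero => simp at hmu
    | succ m =>
      simp only [pvStepB]
      split
      · rename_i hlen
        simp [pvFrame, hlen]
      · rename_i hne
        have hframe : pvFrame tasks tid idx caps = pvPureLoop tasks tid caps idx := if_neg hne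
        cases hscan : pvScanB tasks tid caps idx with
        | some p =>
          obtain ⟨j, t⟩ := p
          simp only
          obtain ⟨hij, hjm, hget, hfit⟩ := pvScanB_some tasks tid caps idx j t hscan
          have hj0 : 0 ≤ j := le_trans h0 hij
          have hdec : pvMu caps.length tasks.length ((tid + 1, 0) :: (tid, j + 1) :: st) <
              pvMu caps.length tasks.length ((tid, idx) :: st) :=
            pvMu_push caps.length tasks.length tid idx j st hij hjm (pvGet_some_lt hget)
          have hIH := IH m (Nat.lt_succ_self m) (tid + 1) 0 ((tid, j + 1) :: st) (alloc.insert tid j)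
            (PySem.List.pySetD caps j (PySem.List.pyGetD caps j 0 - t))
            (by rw [PySem.List.length_pySetD]; omega) le_rfl
            (by
              intro p hp
              rcases List.mem_cons.mp hp with rfl | hp
              · simpa using by omega
              · exact hst p hp)
          rw [hIH]
          -- frame for tid+1 at index 0 is just the pure recursion
          have hz : pvFrame tasks (tid + 1) 0 (PySem.List.pySetD caps j (PySem.List.pyGetD caps j 0 - t)) =
              pvPureA tasks (tid + 1) (PySem.List.pySetD caps j (PySem.List.pyGetD caps j 0 - t)) := by
            unfold pvFrame; rw [pvPureA.eq_def]
          -- resuming the (tid, j+1) frame first restores capacities, then continues the pure loop at j+1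
          have hres : pvResume tasks ((tid, j + 1) :: st)
              (PySem.List.pySetD caps j (PySem.List.pyGetD caps j 0 - t)) =
              (if pvPureLoop tasks tid caps (j + 1) then true else pvResume tasks st caps) := by
            rw [pvResume]
            rw [hget]
            simp only
            have hsimp : j + 1 - 1 = j := by omega
            rw [hsimp, pvRestore_eq caps j hj0 hjm t]
            rw [show pvFrame tasks tid (j + 1) caps = pvPureLoop tasks tid caps (j + 1) from if_neg hne]
          rw [hz, hres, hframe, pvScanB_some_pure tasks tid caps idx j t hscan]
          cases pvPureA tasks (tid + 1) (PySem.List.pySetD caps j (PySem.List.pyGetD caps j 0 - t)) <;>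
            cases pvPureLoop tasks tid caps (j + 1) <;> simp
        | none =>
          simp only
          have hLfalse : pvPureLoop tasks tid caps idx = false := pvScanB_none tasks tid caps idx hscan
          rw [hframe, hLfalse, if_neg (by simp)]
          cases st with
          | nil => simp [pvResume]
          | cons p st' =>
            obtain ⟨ptid, pidx⟩ := p
            rw [pvResume]
            cases hpg : PySem.List.pyGet? tasks ptid with
            | none => simp only [hpg]
            | some pt =>
              simp only [hpg]
              have hIH := IH m (Nat.lt_succ_self m) ptid pidx st' (alloc.erase ptid)
                (PySem.List.pySetD caps (pidx - 1) (PySem.List.pyGetD caps (pidx - 1) 0 + pt))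
                (by
                  rw [PySem.List.length_pySetD]
                  have := pvMu_pop caps.length tasks.length tid idx ((ptid, pidx) :: st')
                  omega)
                (hst (ptid, pidx) (List.mem_cons_self ..))
                (fun p hp => hst p (List.mem_cons_of_mem _ hp))
              rw [hIH]

theorem allocate_task_impl_spec : Claim_equal_allocate_task_impl := by
  intro task_id allocations tasks capacities _ _
  unfold Spec_allocate_task_impl allocate_task_impl_alt
  rw [pvStepB_eq tasks (pvMu capacities.length tasks.length [(task_id, 0)] + 1) task_id 0 []
    (PySem.Dict.mk allocations) capacities (Nat.lt_succ_self _) le_rfl (by simp)]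
  have hA : allocate_task_impl task_id allocations tasks capacities = pvPureA tasks task_id capacities :=
    (pvA_eq_pure tasks _).1 task_id allocations capacities le_rfl
  rw [hA]
  have hz : pvFrame tasks task_id 0 capacities = pvPureA tasks task_id capacities := by
    unfold pvFrame; rw [pvPureA.eq_def]
  rw [hz]
  cases pvPureA tasks task_id capacities <;> simp [pvResume]
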